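-- pv_equiv track=rewrite | github.com/renos/flow-rl | flowrl/skill_depenency_resolver_new.py | _collect_all_dependencies
-- ===== SOURCE A (Python) =====
-- def _collect_all_dependencies(skill_name, execution_order, skill_dependencies):
--     """
--     Recursively collect a skill and all its dependencies that appear in execution_order.
--     Returns list of (skill_name, amount) tuples in the order they appear in execution_order.
--     """
--     collected = []
--     visited = set()
--
--     def collect_recursive(name):
--         if name in visited:
--             return
--         visited.add(name)
--
--         # First collect dependencies recursively
--         if name in skill_dependencies:
--             for dep in skill_dependencies[name]:
--                 collect_recursive(dep)
--
--         # Then add this skill if it's in execution order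
--         for skill, amount in execution_order:
--             if skill == name:
--                 collected.append((skill, amount))
--                 break
--
--     collect_recursive(skill_name)
--     return collected
-- ===== SOURCE B (Python) =====
-- def _collect_all_dependencies(skill_name, execution_order, skill_dependencies):
--     """Iterative DFS with an explicit stack of (name, expanded) pairs."""
--     collected = []
--     visited = set()
--     stack = [(skill_name, False)]
--     while stack:
--         name, expanded = stack.pop()
--         if expanded:
--             for skill, amount in execution_order:
--                 if skill == name:
--                     collected.append((skill, amount))
--                     break
--         else:
--             if name in visited:
--                 continue
--             visited.add(name)
--             stack.append((name, True))
--             if name in skill_dependencies: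
--                 for dep in reversed(skill_dependencies[name]):
--                     stack.append((dep, False))
--     return collected
-- ===== Notes on version B (the rewrite author's own statement) =====
-- stated objective: alternative
-- what changed: Replaces A's recursive DFS (nested closure mutating visited/collected) by an iterative DFS driven by an explicit stack of (name, expanded) pairs: deps are pushed in reverse, the skill itself is appended on the expanded pop, preserving the post-order output exactly.
import Mathlib
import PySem

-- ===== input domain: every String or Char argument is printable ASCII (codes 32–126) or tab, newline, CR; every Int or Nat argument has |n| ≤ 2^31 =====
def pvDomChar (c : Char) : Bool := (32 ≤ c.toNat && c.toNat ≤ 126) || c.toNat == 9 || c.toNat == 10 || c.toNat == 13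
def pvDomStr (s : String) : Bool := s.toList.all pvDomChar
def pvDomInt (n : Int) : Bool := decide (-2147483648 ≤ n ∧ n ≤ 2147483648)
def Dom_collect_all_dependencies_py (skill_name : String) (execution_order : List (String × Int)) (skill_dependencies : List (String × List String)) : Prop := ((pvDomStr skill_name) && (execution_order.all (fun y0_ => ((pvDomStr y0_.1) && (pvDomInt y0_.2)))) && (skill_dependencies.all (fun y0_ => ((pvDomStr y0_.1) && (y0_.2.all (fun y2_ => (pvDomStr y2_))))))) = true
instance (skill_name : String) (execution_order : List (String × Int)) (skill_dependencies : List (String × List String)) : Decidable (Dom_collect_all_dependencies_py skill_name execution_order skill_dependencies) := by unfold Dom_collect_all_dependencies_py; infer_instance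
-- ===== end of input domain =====

-- B replaces A's recursive DFS by an iterative DFS over an explicit stack of (name, expanded)
-- pairs (alternative decomposition; same cost).

-- ===== PORT A =====
-- shared helpers: both Pythons contain the identical inner scans
-- `name in skill_dependencies` + `skill_dependencies[name]` (dict = assoc list, first match):
def pvLookup (sd : List (String × List String)) (n : String) : Option (List String) :=
  (sd.find? (fun p => p.1 == n)).map (fun p => p.2)

-- `for skill, amount in execution_order: if skill == name: … break` (first match):
def pvFirst (eo : List (String × Int)) (n : String) : Option (String × Int) :=
  eo.find? (fun p => p.1 == n)

-- A's nested `collect_recursive`, threading (visited, collected); fuel only bounds the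
-- recursion depth (each nested level marks a fresh key visited, so `sd.length + 1` suffices).
def pvRecA (eo : List (String × Int)) (sd : List (String × List String)) :
    Nat → String → PySem.Set String → List (String × Int) →
    PySem.Set String × List (String × Int)
  | 0, _, v, c => (v, c)
  | Nat.succ f, name, v, c =>
    if name ∈ v then (v, c)
    else
      let st :=
        match pvLookup sd name with
        | some deps => deps.foldl (fun st dep => pvRecA eo sd f dep st.1 st.2) (PySem.Set.add v name, c)
        | none => (PySem.Set.add v name, c)
      match pvFirst eo name with
      | some p => (st.1, st.2 ++ [p])
      | none => st

def collect_all_dependencies_py (skill_name : String) (execution_order : List (String × Int)) (skill_dependencies : List (String × List String)) : List (String × Int) :=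
  (pvRecA execution_order skill_dependencies (skill_dependencies.length + 1) skill_name PySem.Set.empty []).2

-- ===== PORT B =====
-- fuel bound for the while-loop: every iteration pops one entry; an unvisited key `k` is
-- expanded at most once, pushing 1 + |deps k| entries. pvBudget charges each unvisited key.
def pvBudget (sd : List (String × List String)) (v : PySem.Set String) : Nat :=
  sd.foldr (fun p a => (if p.1 ∈ v then 0 else 1 + 2 * p.2.length) + a) 0

-- the while-loop over the explicit stack of (name, expanded) pairs:
def pvRunB (eo : List (String × Int)) (sd : List (String × List String)) :
    Nat → List (String × Bool) → PySem.Set String → List (String × Int) → List (String × Int)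
  | _, [], _, acc => acc
  | 0, _ :: _, _, acc => acc
  | Nat.succ f, (name, true) :: rest, v, acc =>
      pvRunB eo sd f rest v
        (match pvFirst eo name with
         | some p => acc ++ [p]
         | none => acc)
  | Nat.succ f, (name, false) :: rest, v, acc =>
      if name ∈ v then pvRunB eo sd f rest v acc
      else
        pvRunB eo sd f
          (match pvLookup sd name with
           | some deps => deps.reverse.foldl (fun s d => (d, false) :: s) ((name, true) :: rest)
           | none => (name, true) :: rest)
          (PySem.Set.add v name) acc

def collect_all_dependencies_py_alt (skill_name : String) (execution_order : List (String × Int)) (skill_dependencies : List (String × List String)) : List (String × Int) :=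
  pvRunB execution_order skill_dependencies
    (2 + pvBudget skill_dependencies PySem.Set.empty)
    [(skill_name, false)] PySem.Set.empty []

-- ===== PRECONDITION & SPEC =====
def Spec_collect_all_dependencies_py (skill_name : String) (execution_order : List (String × Int)) (skill_dependencies : List (String × List String)) (out : List (String × Int)) : Prop := out = collect_all_dependencies_py_alt skill_name execution_order skill_dependencies
instance (skill_name : String) (execution_order : List (String × Int)) (skill_dependencies : List (String × List String)) (out : List (String × Int)) : Decidable (Spec_collect_all_dependencies_py skill_name execution_order skill_dependencies out) := by unfold Spec_collect_all_dependencies_py; infer_instance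

-- ===== CLAIM (what is proved, stated in full; the proofs are below) =====
def Claim_equal_collect_all_dependencies_py : Prop := ∀ (skill_name : String) (execution_order : List (String × Int)) (skill_dependencies : List (String × List String)), Dom_collect_all_dependencies_py skill_name execution_order skill_dependencies → Spec_collect_all_dependencies_py skill_name execution_order skill_dependencies (collect_all_dependencies_py skill_name execution_order skill_dependencies)

-- ===== LEMMAS AND PROOFS =====

-- number of sd entries whose key is not yet visited (bounds A's recursion depth):
def pvK (sd : List (String × List String)) (v : PySem.Set String) : Nat :=
  sd.foldr (fun p a => (if p.1 ∈ v then 0 else 1) + a) 0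

-- stack weight: an unexpanded entry may cost two pops, an expanded one costs one:
def pvWeight (stack : List (String × Bool)) : Nat :=
  stack.foldr (fun p a => (if p.2 then 1 else 2) + a) 0

-- canonical-fuel wrappers (fuel large enough; stability lemmas below):
def pvRecC (eo : List (String × Int)) (sd : List (String × List String))
    (n : String) (v : PySem.Set String) (c : List (String × Int)) :
    PySem.Set String × List (String × Int) :=
  pvRecA eo sd (pvK sd v + 1) n v c

def pvRunC (eo : List (String × Int)) (sd : List (String × List String))
    (stack : List (String × Bool)) (v : PySem.Set String) (acc : List (String × Int)) :
    List (String × Int) :=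
  pvRunB eo sd (pvWeight stack + pvBudget sd v) stack v acc

lemma pvPush_eq (deps : List String) (t : List (String × Bool)) :
    deps.reverse.foldl (fun s d => (d, false) :: s) t
      = deps.map (fun d => (d, false)) ++ t := by
  induction deps generalizing t with
  | nil => rfl
  | cons d ds ih => simp [List.foldl_append, ih]

lemma pvWeight_append (a b : List (String × Bool)) :
    pvWeight (a ++ b) = pvWeight a + pvWeight b := by
  induction a with
  | nil => simp [pvWeight]
  | cons x xs ih => simp only [pvWeight, List.cons_append, List.foldr] at ih ⊢; omega

lemma pvWeight_map_false (deps : List String) :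
    pvWeight (deps.map (fun d => (d, false))) = 2 * deps.length := by
  induction deps with
  | nil => rfl
  | cons d ds ih => simp [pvWeight] at ih ⊢; omega

lemma pvK_mono (sd : List (String × List String)) (v v' : PySem.Set String)
    (h : ∀ x, x ∈ v → x ∈ v') : pvK sd v' ≤ pvK sd v := by
  induction sd with
  | nil => simp [pvK]
  | cons p sdt ih =>
    simp only [pvK, List.foldr] at ih ⊢
    by_cases hp : p.1 ∈ v
    · simp [hp, h p.1 hp]; omega
    · split_ifs <;> omega

lemma pvBudget_mono (sd : List (String × List String)) (v v' : PySem.Set String)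
    (h : ∀ x, x ∈ v → x ∈ v') : pvBudget sd v' ≤ pvBudget sd v := by
  induction sd with
  | nil => simp [pvBudget]
  | cons p sdt ih =>
    simp only [pvBudget, List.foldr] at ih ⊢
    by_cases hp : p.1 ∈ v
    · simp [hp, h p.1 hp]; omega
    · split_ifs <;> omega

lemma pvK_drop (sd : List (String × List String)) (n : String) (deps : List String)
    (v v' : PySem.Set String) (hl : pvLookup sd n = some deps) (hn : n ∉ v)
    (hn' : n ∈ v') (h : ∀ x, x ∈ v → x ∈ v') : pvK sd v' + 1 ≤ pvK sd v := by
  induction sd with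
  | nil => simp [pvLookup] at hl
  | cons p sdt ih =>
    simp only [pvK, List.foldr]
    by_cases hp : p.1 = n
    · subst hp
      have h2 := pvK_mono sdt v v' h
      simp only [pvK] at h2
      simp [hn, hn']; omega
    · simp only [pvLookup, List.find?] at hl
      have : (p.1 == n) = false := by simp [hp]
      rw [this] at hl
      have h3 := ih hl
      simp only [pvK] at h3
      by_cases hpv : p.1 ∈ v
      · simp [hpv, h p.1 hpv]; omega
      · split_ifs <;> omega

lemma pvBudget_drop (sd : List (String × List String)) (n : String) (deps : List String)
    (v v' : PySem.Set String) (hl : pvLookup sd n = some deps) (hn : n ∉ v)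
    (hn' : n ∈ v') (h : ∀ x, x ∈ v → x ∈ v') :
    pvBudget sd v' + 1 + 2 * deps.length ≤ pvBudget sd v := by
  induction sd with
  | nil => simp [pvLookup] at hl
  | cons p sdt ih =>
    simp only [pvBudget, List.foldr]
    by_cases hp : p.1 = n
    · subst hp
      simp only [pvLookup, List.find?, BEq.rfl] at hl
      simp only [Option.map_some] at hl
      have hd : p.2 = deps := by
        simpa using congrArg (Option.getD · []) hl
      have h2 := pvBudget_mono sdt v v' h
      simp only [pvBudget] at h2
      simp [hn, hn', hd]; omega
    · simp only [pvLookup, List.find?] at hl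
      have : (p.1 == n) = false := by simp [hp]
      rw [this] at hl
      have h3 := ih hl
      simp only [pvBudget] at h3
      by_cases hpv : p.1 ∈ v
      · simp [hpv, h p.1 hpv]; omega
      · split_ifs <;> omega

-- A's recursion only appends to visited:
lemma pvRecA_mono (eo : List (String × Int)) (sd : List (String × List String)) :
    ∀ (f : Nat) (n : String) (v : PySem.Set String) (c : List (String × Int)),
      ∃ t, (pvRecA eo sd f n v c).1 = v ++ t := by
  intro f
  induction f with
  | zero => intro n v c; exact ⟨[], by simp [pvRecA]⟩
  | succ f ih =>
    intro n v c
    by_cases hn : n ∈ v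
    · exact ⟨[], by simp [pvRecA, hn]⟩
    · have hfold : ∀ (deps : List String) (v0 : PySem.Set String) (c0 : List (String × Int)),
          ∃ t, (deps.foldl (fun st dep => pvRecA eo sd f dep st.1 st.2) (v0, c0)).1 = v0 ++ t := by
        intro deps
        induction deps with
        | nil => intro v0 c0; exact ⟨[], by simp⟩
        | cons d ds ihd =>
          intro v0 c0
          obtain ⟨t1, ht1⟩ := ih d v0 c0
          obtain ⟨t2, ht2⟩ := ihd (pvRecA eo sd f d v0 c0).1 (pvRecA eo sd f d v0 c0).2
          refine ⟨t1 ++ t2, ?_⟩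
          simp only [List.foldl_cons]
          rw [ht2, ht1, List.append_assoc]
      have hadd : PySem.Set.add v n = v ++ [n] := PySem.Set.add_of_not_mem hn
      simp only [pvRecA, hn, if_false]
      cases hl : pvLookup sd n with
      | none =>
        cases hf : pvFirst eo n <;> exact ⟨[n], by simp [hadd]⟩
      | some deps =>
        obtain ⟨t, ht⟩ := hfold deps (PySem.Set.add v n) c
        cases hf : pvFirst eo n <;>
          exact ⟨[n] ++ t, by simp; rw [ht, hadd]; simp⟩

lemma pvRecA_subset (eo : List (String × Int)) (sd : List (String × List String))
    (f : Nat) (n : String) (v : PySem.Set String) (c : List (String × Int)) :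
    ∀ x, x ∈ v → x ∈ (pvRecA eo sd f n v c).1 := by
  obtain ⟨t, ht⟩ := pvRecA_mono eo sd f n v c
  intro x hx; rw [ht]; exact List.mem_append_left _ hx

-- fuel stability for A: any two sufficient fuels give the same result.
lemma pvRecA_fuel (eo : List (String × Int)) (sd : List (String × List String)) :
    ∀ (f g : Nat) (n : String) (v : PySem.Set String) (c : List (String × Int)),
      pvK sd v + 1 ≤ f → pvK sd v + 1 ≤ g →
      pvRecA eo sd f n v c = pvRecA eo sd g n v c := by
  intro f
  induction f using Nat.strong_induction_on with
  | _ f ihf =>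
    intro g n v c hf hg
    obtain ⟨f', rfl⟩ : ∃ f', f = f' + 1 := ⟨f - 1, by omega⟩
    obtain ⟨g', rfl⟩ : ∃ g', g = g' + 1 := ⟨g - 1, by omega⟩
    by_cases hn : n ∈ v
    · simp [pvRecA, hn]
    · simp only [pvRecA, hn, if_false]
      cases hl : pvLookup sd n with
      | none => rfl
      | some deps =>
        have hKadd : pvK sd (PySem.Set.add v n) + 1 ≤ pvK sd v :=
          pvK_drop sd n deps v (PySem.Set.add v n) hl hn
            (by simp [PySem.Set.mem_add]) (fun x hx => by simp [PySem.Set.mem_add, hx])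
        have hfold : ∀ (ds : List String) (v0 : PySem.Set String) (c0 : List (String × Int)),
            pvK sd v0 + 1 ≤ f' → pvK sd v0 + 1 ≤ g' →
            ds.foldl (fun st dep => pvRecA eo sd f' dep st.1 st.2) (v0, c0)
              = ds.foldl (fun st dep => pvRecA eo sd g' dep st.1 st.2) (v0, c0) := by
          intro ds
          induction ds with
          | nil => intro v0 c0 _ _; rfl
          | cons d dst ihd =>
            intro v0 c0 h0f h0g
            have hstep : pvRecA eo sd f' d v0 c0 = pvRecA eo sd g' d v0 c0 :=
              ihf f' (by omega) g' d v0 c0 h0f h0g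
            simp only [List.foldl_cons]
            rw [← hstep]
            have hsub := pvRecA_subset eo sd f' d v0 c0
            have hKle : pvK sd (pvRecA eo sd f' d v0 c0).1 ≤ pvK sd v0 :=
              pvK_mono sd v0 _ hsub
            exact ihd _ _ (by omega) (by omega)
        have hfe := hfold deps (PySem.Set.add v n) c (by omega) (by omega)
        cases pvFirst eo n <;> simp [hfe]

lemma pvRecA_eq_recC (eo : List (String × Int)) (sd : List (String × List String))
    (f : Nat) (n : String) (v : PySem.Set String) (c : List (String × Int))
    (hf : pvK sd v + 1 ≤ f) :
    pvRecA eo sd f n v c = pvRecC eo sd n v c :=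
  pvRecA_fuel eo sd f (pvK sd v + 1) n v c hf (le_refl _)

lemma pvRunB_nil (eo : List (String × Int)) (sd : List (String × List String))
    (f : Nat) (v : PySem.Set String) (acc : List (String × Int)) :
    pvRunB eo sd f [] v acc = acc := by
  cases f <;> rfl

-- fuel stability for B: any two fuels ≥ weight(stack) + budget(visited) agree.
lemma pvRunB_fuel (eo : List (String × Int)) (sd : List (String × List String)) :
    ∀ (f g : Nat) (stack : List (String × Bool)) (v : PySem.Set String)
      (acc : List (String × Int)),
      pvWeight stack + pvBudget sd v ≤ f → pvWeight stack + pvBudget sd v ≤ g →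
      pvRunB eo sd f stack v acc = pvRunB eo sd g stack v acc := by
  intro f
  induction f using Nat.strong_induction_on with
  | _ f ihf =>
    intro g stack v acc hf hg
    cases stack with
    | nil => rw [pvRunB_nil, pvRunB_nil]
    | cons e rest =>
      obtain ⟨n, b⟩ := e
      have hw : 1 ≤ pvWeight ((n, b) :: rest) := by
        simp only [pvWeight, List.foldr]; split_ifs <;> omega
      obtain ⟨f', rfl⟩ : ∃ f', f = f' + 1 := ⟨f - 1, by omega⟩
      obtain ⟨g', rfl⟩ : ∃ g', g = g' + 1 := ⟨g - 1, by omega⟩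
      have hwc : pvWeight ((n, b) :: rest) = (if b then 1 else 2) + pvWeight rest := rfl
      cases b with
      | true =>
        simp only [pvRunB]
        exact ihf f' (by omega) g' rest v _
          (by rw [hwc] at hf; simp at hf ⊢; omega)
          (by rw [hwc] at hg; simp at hg ⊢; omega)
      | false =>
        by_cases hn : n ∈ v
        · simp only [pvRunB, hn, if_true]
          exact ihf f' (by omega) g' rest v acc
            (by rw [hwc] at hf; simp at hf ⊢; omega)
            (by rw [hwc] at hg; simp at hg ⊢; omega)
        · simp only [pvRunB, hn, if_false]
          have hmem : ∀ x, x ∈ v → x ∈ PySem.Set.add v n := fun x hx => by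
            simp [PySem.Set.mem_add, hx]
          cases hl : pvLookup sd n with
          | none =>
            have hb := pvBudget_mono sd v (PySem.Set.add v n) hmem
            refine ihf f' (by omega) g' _ _ acc ?_ ?_ <;>
            · rw [hwc] at hf hg
              simp only [pvWeight, List.foldr] at *
              simp at hf hg ⊢
              omega
          | some deps =>
            have hb := pvBudget_drop sd n deps v (PySem.Set.add v n) hl hn
              (by simp [PySem.Set.mem_add]) hmem
            simp only [pvPush_eq]
            have hwp : pvWeight (deps.map (fun d => (d, false)) ++ (n, true) :: rest)
                = 2 * deps.length + (1 + pvWeight rest) := by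
              rw [pvWeight_append, pvWeight_map_false]; rfl
            refine ihf f' (by omega) g' _ _ acc ?_ ?_ <;>
            · rw [hwc] at hf hg
              rw [hwp]
              simp at hf hg ⊢
              omega

lemma pvRunB_eq_runC (eo : List (String × Int)) (sd : List (String × List String))
    (f : Nat) (stack : List (String × Bool)) (v : PySem.Set String)
    (acc : List (String × Int)) (hf : pvWeight stack + pvBudget sd v ≤ f) :
    pvRunB eo sd f stack v acc = pvRunC eo sd stack v acc :=
  pvRunB_fuel eo sd f (pvWeight stack + pvBudget sd v) stack v acc hf (le_refl _)

-- step lemmas for the canonical stack machine: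
lemma pvRunC_nil (eo : List (String × Int)) (sd : List (String × List String))
    (v : PySem.Set String) (acc : List (String × Int)) :
    pvRunC eo sd [] v acc = acc := pvRunB_nil _ _ _ _ _

lemma pvRunC_true (eo : List (String × Int)) (sd : List (String × List String))
    (n : String) (rest : List (String × Bool)) (v : PySem.Set String)
    (acc : List (String × Int)) :
    pvRunC eo sd ((n, true) :: rest) v acc
      = pvRunC eo sd rest v
          (match pvFirst eo n with | some p => acc ++ [p] | none => acc) := by
  have h : pvWeight ((n, true) :: rest) + pvBudget sd v
      = (pvWeight rest + pvBudget sd v) + 1 := by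
    simp only [pvWeight, List.foldr]; simp; omega
  rw [pvRunC, h]
  simp only [pvRunB]
  exact pvRunB_eq_runC eo sd _ _ _ _ (le_refl _)

lemma pvRunC_false_mem (eo : List (String × Int)) (sd : List (String × List String))
    (n : String) (rest : List (String × Bool)) (v : PySem.Set String)
    (acc : List (String × Int)) (hn : n ∈ v) :
    pvRunC eo sd ((n, false) :: rest) v acc = pvRunC eo sd rest v acc := by
  have h : pvWeight ((n, false) :: rest) + pvBudget sd v
      = (pvWeight rest + pvBudget sd v) + 2 := by
    simp only [pvWeight, List.foldr]; simp; omega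
  rw [pvRunC, h]
  simp only [pvRunB, hn, if_true]
  exact pvRunB_eq_runC eo sd _ _ _ _ (by omega)

lemma pvRunC_false_new (eo : List (String × Int)) (sd : List (String × List String))
    (n : String) (rest : List (String × Bool)) (v : PySem.Set String)
    (acc : List (String × Int)) (hn : n ∉ v) :
    pvRunC eo sd ((n, false) :: rest) v acc
      = pvRunC eo sd
          (match pvLookup sd n with
           | some deps => deps.map (fun d => (d, false)) ++ (n, true) :: rest
           | none => (n, true) :: rest)
          (PySem.Set.add v n) acc := by
  have hmem : ∀ x, x ∈ v → x ∈ PySem.Set.add v n := fun x hx => by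
    simp [PySem.Set.mem_add, hx]
  have hwc : pvWeight ((n, false) :: rest) = 2 + pvWeight rest := by
    simp only [pvWeight, List.foldr]; simp
  obtain ⟨f', hfe⟩ : ∃ f', pvWeight ((n, false) :: rest) + pvBudget sd v = f' + 1 :=
    ⟨pvWeight ((n, false) :: rest) + pvBudget sd v - 1, by rw [hwc]; omega⟩
  rw [pvRunC, hfe]
  simp only [pvRunB, hn, if_false]
  cases hl : pvLookup sd n with
  | none =>
    have hb := pvBudget_mono sd v (PySem.Set.add v n) hmem
    refine pvRunB_eq_runC eo sd f' _ _ _ ?_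
    have : pvWeight ((n, true) :: rest) = 1 + pvWeight rest := by
      simp only [pvWeight, List.foldr]; simp
    rw [this]; rw [hwc] at hfe; omega
  | some deps =>
    have hb := pvBudget_drop sd n deps v (PySem.Set.add v n) hl hn
      (by simp [PySem.Set.mem_add]) hmem
    simp only [pvPush_eq]
    refine pvRunB_eq_runC eo sd f' _ _ _ ?_
    have : pvWeight (deps.map (fun d => (d, false)) ++ (n, true) :: rest)
        = 2 * deps.length + (1 + pvWeight rest) := by
      rw [pvWeight_append, pvWeight_map_false]
      simp only [pvWeight, List.foldr]; simp
    rw [this]; rw [hwc] at hfe; omega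

-- step lemmas for the canonical recursion:
lemma pvRecC_mem (eo : List (String × Int)) (sd : List (String × List String))
    (n : String) (v : PySem.Set String) (c : List (String × Int)) (hn : n ∈ v) :
    pvRecC eo sd n v c = (v, c) := by
  simp [pvRecC, pvRecA, hn]

lemma pvRecC_subset (eo : List (String × Int)) (sd : List (String × List String))
    (n : String) (v : PySem.Set String) (c : List (String × Int)) :
    ∀ x, x ∈ v → x ∈ (pvRecC eo sd n v c).1 :=
  pvRecA_subset eo sd _ n v c

lemma pvRecC_new (eo : List (String × Int)) (sd : List (String × List String))
    (n : String) (v : PySem.Set String) (c : List (String × Int)) (hn : n ∉ v) :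
    pvRecC eo sd n v c
      = (match
          (match pvLookup sd n with
           | some deps => deps.foldl (fun st dep => pvRecC eo sd dep st.1 st.2) (PySem.Set.add v n, c)
           | none => (PySem.Set.add v n, c)),
          pvFirst eo n with
         | st, some p => (st.1, st.2 ++ [p])
         | st, none => st) := by
  rw [pvRecC]
  simp only [pvRecA, hn, if_false]
  cases hl : pvLookup sd n with
  | none => cases pvFirst eo n <;> rfl
  | some deps =>
    have hKadd : pvK sd (PySem.Set.add v n) + 1 ≤ pvK sd v :=
      pvK_drop sd n deps v (PySem.Set.add v n) hl hn
        (by simp [PySem.Set.mem_add]) (fun x hx => by simp [PySem.Set.mem_add, hx])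
    have hfold : ∀ (ds : List String) (v0 : PySem.Set String) (c0 : List (String × Int)),
        pvK sd v0 + 1 ≤ pvK sd v →
        ds.foldl (fun st dep => pvRecA eo sd (pvK sd v) dep st.1 st.2) (v0, c0)
          = ds.foldl (fun st dep => pvRecC eo sd dep st.1 st.2) (v0, c0) := by
      intro ds
      induction ds with
      | nil => intro v0 c0 _; rfl
      | cons d dst ihd =>
        intro v0 c0 h0
        have hstep : pvRecA eo sd (pvK sd v) d v0 c0 = pvRecC eo sd d v0 c0 :=
          pvRecA_eq_recC eo sd _ d v0 c0 (by omega)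
        simp only [List.foldl_cons]
        rw [hstep]
        have hKle : pvK sd (pvRecC eo sd d v0 c0).1 ≤ pvK sd v0 :=
          pvK_mono sd v0 _ (pvRecC_subset eo sd d v0 c0)
        exact ihd (pvRecC eo sd d v0 c0).1 (pvRecC eo sd d v0 c0).2 (by omega)
    have hfe := hfold deps (PySem.Set.add v n) c hKadd
    cases pvFirst eo n <;> simp [hfe]

-- the bridge: popping an unexpanded entry runs the whole recursive call.
lemma pvBridge (eo : List (String × Int)) (sd : List (String × List String)) :
    ∀ (m : Nat) (v : PySem.Set String), pvK sd v ≤ m →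
      ∀ (n : String) (rest : List (String × Bool)) (acc : List (String × Int)),
        pvRunC eo sd ((n, false) :: rest) v acc
          = pvRunC eo sd rest (pvRecC eo sd n v acc).1 (pvRecC eo sd n v acc).2 := by
  intro m
  induction m with
  | zero =>
    intro v hv n rest acc
    by_cases hn : n ∈ v
    · rw [pvRunC_false_mem eo sd n rest v acc hn, pvRecC_mem eo sd n v acc hn]
    · cases hl : pvLookup sd n with
      | none =>
        rw [pvRunC_false_new eo sd n rest v acc hn, pvRecC_new eo sd n v acc hn]
        simp only [hl]
        rw [pvRunC_true]
        cases pvFirst eo n <;> rfl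
      | some deps =>
        exfalso
        have := pvK_drop sd n deps v (PySem.Set.add v n) hl hn
          (by simp [PySem.Set.mem_add]) (fun x hx => by simp [PySem.Set.mem_add, hx])
        omega
  | succ m ihm =>
    intro v hv n rest acc
    by_cases hn : n ∈ v
    · rw [pvRunC_false_mem eo sd n rest v acc hn, pvRecC_mem eo sd n v acc hn]
    · cases hl : pvLookup sd n with
      | none =>
        rw [pvRunC_false_new eo sd n rest v acc hn, pvRecC_new eo sd n v acc hn]
        simp only [hl]
        rw [pvRunC_true]
        cases pvFirst eo n <;> rfl
      | some deps =>
        have hKadd : pvK sd (PySem.Set.add v n) + 1 ≤ pvK sd v :=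
          pvK_drop sd n deps v (PySem.Set.add v n) hl hn
            (by simp [PySem.Set.mem_add]) (fun x hx => by simp [PySem.Set.mem_add, hx])
        have hinner : ∀ (ds : List String) (v' : PySem.Set String) (acc' : List (String × Int)),
            pvK sd v' + 1 ≤ pvK sd v →
            pvRunC eo sd (ds.map (fun d => (d, false)) ++ (n, true) :: rest) v' acc'
              = pvRunC eo sd ((n, true) :: rest)
                  (ds.foldl (fun st d => pvRecC eo sd d st.1 st.2) (v', acc')).1
                  (ds.foldl (fun st d => pvRecC eo sd d st.1 st.2) (v', acc')).2 := by
          intro ds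
          induction ds with
          | nil => intro v' acc' _; rfl
          | cons d dst ihd =>
            intro v' acc' h'
            simp only [List.map_cons, List.cons_append]
            rw [ihm v' (by omega) d _ acc']
            have hKle : pvK sd (pvRecC eo sd d v' acc').1 ≤ pvK sd v' :=
              pvK_mono sd v' _ (pvRecC_subset eo sd d v' acc')
            rw [ihd _ _ (by omega)]
            simp only [List.foldl_cons]
        rw [pvRunC_false_new eo sd n rest v acc hn, pvRecC_new eo sd n v acc hn]
        simp only [hl]
        rw [hinner deps (PySem.Set.add v n) acc hKadd, pvRunC_true]
        cases pvFirst eo n <;> rfl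

lemma pvK_le_length (sd : List (String × List String)) (v : PySem.Set String) :
    pvK sd v ≤ sd.length := by
  induction sd with
  | nil => simp [pvK]
  | cons p sdt ih => simp only [pvK, List.foldr, List.length_cons] at ih ⊢; split_ifs <;> omega

-- ===== VERDICT (by name: the statement is the Claim_ definition above) =====
theorem collect_all_dependencies_py_spec : Claim_equal_collect_all_dependencies_py := by
  intro sn eo sd _
  unfold Spec_collect_all_dependencies_py
  unfold collect_all_dependencies_py collect_all_dependencies_py_alt
  rw [pvRecA_eq_recC eo sd (sd.length + 1) sn PySem.Set.empty []
    (by have := pvK_le_length sd PySem.Set.empty; omega)]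
  rw [pvRunB_eq_runC eo sd _ [(sn, false)] PySem.Set.empty []
    (by simp only [pvWeight, List.foldr]; simp)]
  rw [pvBridge eo sd (pvK sd PySem.Set.empty) PySem.Set.empty (le_refl _) sn [] []]
  rw [pvRunC_nil]
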